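-- pv_equiv track=rewrite | github.com/plaans/tyr | src/tyr/planners/optic/__init__.py | _get_plan
-- ===== SOURCE A (Python) =====
-- from typing import Any, List, Optional
--
-- def _get_plan(proc_out: List[str]) -> str:
--     sol_found = "; Time"
--     sol_idx = -1
--     for idx, line in enumerate(proc_out):
--         if sol_found in line:
--             sol_idx = idx
--             break
--     if sol_idx == -1:
--         # No solution
--         plan = []
--     else:
--         # Keep only the plan with the time
--         plan = proc_out[sol_idx:]
--         try:
--             plan = plan[: plan.index("\n")]
--         except ValueError:
--             pass
--     return "\n".join(plan)
-- ===== SOURCE B (Python) =====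
-- def _get_plan(proc_out):
--     acc = []
--     found = False
--     for line in proc_out:
--         if not found:
--             if "; Time" in line:
--                 found = True
--                 acc.append(line)
--         elif line == "\n":
--             break
--         else:
--             acc.append(line)
--     return "\n".join(acc)
-- ===== Notes on version B (the rewrite author's own statement) =====
-- stated objective: simpler
-- what changed: Replaced the locate-index / slice / list.index-with-try-except pipeline by a single pass over the lines with a found flag and an accumulator, breaking on the first bare newline line after the marker.
import Mathlib
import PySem

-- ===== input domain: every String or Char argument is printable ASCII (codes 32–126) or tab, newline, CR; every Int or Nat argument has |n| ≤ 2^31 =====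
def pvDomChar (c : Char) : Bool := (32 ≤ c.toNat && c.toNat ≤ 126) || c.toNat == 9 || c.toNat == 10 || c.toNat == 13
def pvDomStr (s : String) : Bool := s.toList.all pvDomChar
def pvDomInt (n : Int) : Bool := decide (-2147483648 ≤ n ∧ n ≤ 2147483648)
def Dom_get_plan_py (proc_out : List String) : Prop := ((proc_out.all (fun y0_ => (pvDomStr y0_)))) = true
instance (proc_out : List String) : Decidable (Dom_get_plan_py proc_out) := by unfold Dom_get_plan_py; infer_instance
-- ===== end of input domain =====

-- B is a single pass with a found flag and an accumulator instead of A's locate-index / slice / list.index pipeline (objective: simpler).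

-- shared helper: both Pythons test '"; Time" in line'
def pvHasTime (l : String) : Bool := PySem.Str.isIn "; Time" l

-- ===== PORT A =====
-- A's first loop: first index (counting from idx) whose line contains "; Time", -1 if none.
def getPlanFindA : List String → Int → Int
  | [], _ => -1
  | l :: rest, idx => if pvHasTime l then idx else getPlanFindA rest (idx + 1)

def get_plan_py (proc_out : List String) : String :=
  let sol_idx := getPlanFindA proc_out 0
  if sol_idx = -1 then
    PySem.Str.join "\n" []
  else
    let plan := PySem.List.slice proc_out (some sol_idx) none
    let plan :=
      match PySem.List.index? plan "\n" with
      | some k => PySem.List.slice plan none (some (k : Int))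
      | none => plan
    PySem.Str.join "\n" plan

-- ===== PORT B =====
-- Source B's loop, found=true phase: keep lines until one equal to "\n".
def getPlanScanB : List String → List String
  | [] => []
  | l :: rest => if l = "\n" then [] else l :: getPlanScanB rest

-- Source B's loop, found=false phase: skip until a line contains "; Time".
def getPlanSeekB : List String → List String
  | [] => []
  | l :: rest => if pvHasTime l then l :: getPlanScanB rest else getPlanSeekB rest

def get_plan_py_alt (proc_out : List String) : String :=
  PySem.Str.join "\n" (getPlanSeekB proc_out)

-- ===== PRECONDITION & SPEC =====
def Spec_get_plan_py (proc_out : List String) (out : String) : Prop := out = get_plan_py_alt proc_out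
instance (proc_out : List String) (out : String) : Decidable (Spec_get_plan_py proc_out out) := by unfold Spec_get_plan_py; infer_instance

-- ===== CLAIM (what is proved, stated in full; the proofs are below) =====
def Claim_equal_get_plan_py : Prop := ∀ (proc_out : List String), Dom_get_plan_py proc_out → Spec_get_plan_py proc_out (get_plan_py proc_out)

-- ===== LEMMAS AND PROOFS =====

-- A's plan list, stated directly via findIdx? / drop / take.
def planA (xs : List String) : List String :=
  match xs.findIdx? (fun l => pvHasTime l) with
  | none => []
  | some k =>
    match PySem.List.index? (xs.drop k) "\n" with
    | some j => (xs.drop k).take j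
    | none => xs.drop k

-- A's find loop, characterised by List.findIdx?.
theorem getPlanFindA_eq (xs : List String) (n : Nat) :
    getPlanFindA xs (n : Int) =
      match xs.findIdx? (fun l => pvHasTime l) with
      | some k => ((n + k : Nat) : Int)
      | none => -1 := by
  induction xs generalizing n with
  | nil => simp [getPlanFindA]
  | cons l rest ih =>
    simp only [getPlanFindA, List.findIdx?_cons]
    by_cases h : pvHasTime l = true
    · simp [h]
    · simp only [h, Bool.false_eq_true, if_false]
      rw [show ((n : Int) + 1) = ((n + 1 : Nat) : Int) by push_cast; ring, ih]
      cases hf : rest.findIdx? (fun l => pvHasTime l) with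
      | none => simp
      | some k =>
        simp only [Option.map_some]
        congr 1
        omega

theorem get_plan_py_eq_planA (xs : List String) :
    get_plan_py xs = PySem.Str.join "\n" (planA xs) := by
  unfold get_plan_py planA
  rw [show (0 : Int) = ((0 : Nat) : Int) from rfl, getPlanFindA_eq]
  cases hf : xs.findIdx? (fun l => pvHasTime l) with
  | none => simp
  | some k =>
    have hne : ¬ (((0 + k : Nat) : Int) = -1) := by omega
    simp only [if_neg hne]
    rw [show ((0 + k : Nat) : Int) = ((k : Nat) : Int) by norm_num,
       PySem.List.slice_from_natCast]
    cases hj : PySem.List.index? (xs.drop k) "\n" with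
    | none => rfl
    | some j => simp [PySem.List.slice_to_natCast]

-- B's scan phase = truncate at the first "\n".
theorem getPlanScanB_eq (xs : List String) :
    getPlanScanB xs =
      match PySem.List.index? xs "\n" with
      | some k => xs.take k
      | none => xs := by
  induction xs with
  | nil => simp [getPlanScanB, PySem.List.index?]
  | cons l rest ih =>
    by_cases h : l = "\n"
    · subst h
      rw [PySem.List.index?_cons_self]
      simp [getPlanScanB]
    · rw [PySem.List.index?_cons_of_ne rest h]
      simp only [getPlanScanB, if_neg h, ih]
      cases PySem.List.index? rest "\n" with
      | none => simp
      | some k => simp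

theorem pvHasTime_newline_ne (l : String) (h : pvHasTime l = true) : l ≠ "\n" := by
  intro he; subst he; revert h; decide

theorem planA_eq_seekB (xs : List String) : planA xs = getPlanSeekB xs := by
  induction xs with
  | nil => simp [planA, getPlanSeekB]
  | cons l rest ih =>
    by_cases h : pvHasTime l = true
    · unfold planA
      simp only [List.findIdx?_cons, h, if_pos, List.drop_zero]
      rw [PySem.List.index?_cons_of_ne rest (pvHasTime_newline_ne l h)]
      simp only [getPlanSeekB, h, if_pos, getPlanScanB_eq]
      cases PySem.List.index? rest "\n" with
      | none => simp
      | some k => simp [List.take_succ_cons]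
    · unfold planA
      simp only [List.findIdx?_cons, h, Bool.false_eq_true, if_false]
      simp only [getPlanSeekB, h, Bool.false_eq_true, if_false]
      rw [← ih]
      unfold planA
      cases hf : rest.findIdx? (fun l => pvHasTime l) with
      | none => simp
      | some k => simp [List.drop_succ_cons]

-- ===== VERDICT (by name: the statement is the Claim_ definition above) =====
theorem get_plan_py_spec : Claim_equal_get_plan_py := by
  intro proc_out _
  unfold Spec_get_plan_py get_plan_py_alt
  rw [get_plan_py_eq_planA, planA_eq_seekB]
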